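-- pv_equiv track=rewrite | github.com/RobertBaruch/lmarv | lmarv-1/utils.py | to_bin
-- ===== SOURCE A (Python) =====
-- def to_bin(num, sep='_', bits=32):
--   # Return the num in binary form.
--   ret = ''
--   while bits > 0:
--     bits -= 1
--     if num & (1 << bits):
--       ret += '1'
--     else:
--       ret += '0'
--
--     if bits and (bits % 8) == 0:
--       ret += sep
--
--   return ret
-- ===== SOURCE B (Python) =====
-- def to_bin(num, sep='_', bits=32):
--     # Build the full bit string once, then insert separators in a second pass,
--     # grouping in 8s counted from the LSB (head group = bits % 8 or 8).
--     if bits <= 0: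
--         return ''
--     s = format(num & ((1 << bits) - 1), '0{}b'.format(bits))
--     head = bits % 8 or 8
--     groups = [s[:head]]
--     rest = s[head:]
--     while rest:
--         groups.append(rest[:8])
--         rest = rest[8:]
--     return sep.join(groups)
-- ===== Notes on version B (the rewrite author's own statement) =====
-- stated objective: simpler
-- what changed: A interleaves bit extraction and separator insertion in one bit-by-bit loop over descending bit indices with repeated string concatenation; B first builds the whole bit string in one masking+format step and then joins LSB-aligned groups of 8 with the separator in a second pass.
import Mathlib
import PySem

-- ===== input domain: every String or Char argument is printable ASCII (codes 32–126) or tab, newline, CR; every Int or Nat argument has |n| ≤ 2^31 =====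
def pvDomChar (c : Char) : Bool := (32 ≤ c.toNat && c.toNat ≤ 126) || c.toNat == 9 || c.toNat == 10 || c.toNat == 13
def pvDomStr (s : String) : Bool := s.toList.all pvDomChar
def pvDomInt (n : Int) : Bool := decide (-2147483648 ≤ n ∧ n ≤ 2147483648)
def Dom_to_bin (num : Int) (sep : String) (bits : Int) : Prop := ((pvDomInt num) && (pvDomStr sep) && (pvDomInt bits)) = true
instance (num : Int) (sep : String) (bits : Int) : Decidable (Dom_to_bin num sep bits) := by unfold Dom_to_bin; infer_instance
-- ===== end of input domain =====

-- B replaces A's interleaved bit-by-bit loop by a simpler build-then-reshape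
-- decomposition: compute the full bit string once, then join LSB-aligned groups of 8.

-- ===== PORT A =====
-- 'num & (1 << b)' is truthy iff bit b of num's two's-complement value is 1,
-- i.e. iff (num // 2**b) % 2 == 1 (exact for Python's & with a single power of two).
def pyTestBit (num : Int) (b : Nat) : Bool :=
  PySem.Int.mod (PySem.Int.floordiv num ((2:Int)^b)) 2 == 1

-- the while loop: bits counts down to 0, ret accumulates
def to_bin_loop (num : Int) (sep : List Char) : Nat → List Char → List Char
  | 0, ret => ret
  | b+1, ret =>
      let ret1 := ret ++ [if pyTestBit num b then '1' else '0']
      let ret2 := if b ≠ 0 ∧ b % 8 = 0 then ret1 ++ sep else ret1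
      to_bin_loop num sep b ret2

def to_bin (num : Int) (sep : String) (bits : Int) : String :=
  -- the loop runs max(bits, 0) times
  String.mk (to_bin_loop num sep.toList bits.toNat [])

-- ===== PORT B =====
-- format(v, '0{n}b'): the n-character binary representation, MSB first (exact here
-- since B only applies it to v = num & ((1 << n) - 1) < 2^n, so no overflow digits)
def fmtBin : Nat → Nat → List Char
  | 0, _ => []
  | w+1, v => fmtBin w (v / 2) ++ [if v % 2 = 1 then '1' else '0']

-- the while loop over rest: groups.append(rest[:8]); rest = rest[8:]
def chunk8 : List Char → List (List Char)
  | [] => []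
  | c :: rest => ((c :: rest).take 8) :: chunk8 ((c :: rest).drop 8)
  termination_by l => l.length
  decreasing_by simp

def to_bin_alt (num : Int) (sep : String) (bits : Int) : String :=
  if bits ≤ 0 then "" else
    let n := bits.toNat
    -- num & ((1 << bits) - 1) is Python's num % 2**bits (nonnegative) for bits > 0
    let s := fmtBin n (PySem.Int.mod num ((2:Int)^n)).toNat
    let head := if n % 8 = 0 then 8 else n % 8          -- bits % 8 or 8
    let groups := s.take head :: chunk8 (s.drop head)   -- s[:head] then the loop
    String.mk (List.intercalate sep.toList groups)      -- sep.join(groups)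

-- ===== PRECONDITION & SPEC =====
def Spec_to_bin (num : Int) (sep : String) (bits : Int) (out : String) : Prop := out = to_bin_alt num sep bits
instance (num : Int) (sep : String) (bits : Int) (out : String) : Decidable (Spec_to_bin num sep bits out) := by unfold Spec_to_bin; infer_instance

-- ===== CLAIM (what is proved, stated in full; the proofs are below) =====
def Claim_equal_to_bin : Prop := ∀ (num : Int) (sep : String) (bits : Int), Dom_to_bin num sep bits → Spec_to_bin num sep bits (to_bin num sep bits)

-- ===== LEMMAS AND PROOFS =====

-- the accumulator-free value of A's loop
def coreG (c : Nat → Char) (sep : List Char) : Nat → List Char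
  | 0 => []
  | b+1 => c b :: ((if b ≠ 0 ∧ b % 8 = 0 then sep else []) ++ coreG c sep b)

lemma to_bin_loop_eq (num : Int) (sep : List Char) :
    ∀ (n : Nat) (ret : List Char),
      to_bin_loop num sep n ret = ret ++ coreG (fun b => if pyTestBit num b then '1' else '0') sep n := by
  intro n
  induction n with
  | zero => intro ret; simp [to_bin_loop, coreG]
  | succ b ih =>
      intro ret
      simp only [to_bin_loop, coreG]
      split_ifs with h <;> simp [ih, List.append_assoc]

lemma fmtBin_reverse (n : Nat) : ∀ v : Nat,
    fmtBin n v = (((List.range n).map (fun b => if v / 2^b % 2 = 1 then '1' else '0')).reverse) := by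
  induction n with
  | zero => intro v; simp [fmtBin]
  | succ w ih =>
      intro v
      have hdd : (fun b => if v / 2 / 2 ^ b % 2 = 1 then '1' else '0')
          = ((fun b => if v / 2 ^ b % 2 = 1 then '1' else '0') ∘ Nat.succ) := by
        funext b
        simp only [Function.comp, Nat.div_div_eq_div_mul, Nat.succ_eq_add_one]
        rw [← pow_succ']
      simp only [fmtBin, ih (v / 2), List.range_succ_eq_map, List.map_cons, List.map_map,
        List.reverse_cons, hdd]
      simp

-- bit agreement: A tests bit b of num, B tests bit b of num % 2^n; equal for b < n
lemma bit_agree (num : Int) (n b : Nat) (hb : b < n) :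
    (if pyTestBit num b then '1' else '0')
      = (if (PySem.Int.mod num ((2:Int)^n)).toNat / 2^b % 2 = 1 then '1' else '0') := by
  have h2b : (0:Int) < 2^b := by positivity
  have h2n : (0:Int) < 2^n := by positivity
  set r : Int := PySem.Int.mod num ((2:Int)^n) with hr
  have hrE : r = num % 2^n := by rw [hr, PySem.Int.mod_eq_emod_of_pos h2n]
  have hr0 : 0 ≤ r := by rw [hrE]; exact Int.emod_nonneg _ (by positivity)
  -- (num / 2^b) % 2 = (r / 2^b) % 2
  have key : (num / 2^b) % 2 = (r / 2^b) % 2 := by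
    have hnum : num = r + 2^b * (2^(n-b-1) * 2 * (num / 2^n)) := by
      have e : (2:Int)^b * (2^(n-b-1) * 2) = 2^n := by
        rw [← pow_succ]
        rw [← pow_add]
        congr 1
        omega
      have h1 := Int.ediv_add_emod num (2^n)
      rw [← hrE] at h1
      have e2 : (2:Int)^b * (2^(n-b-1) * 2 * (num / 2^n)) = 2^n * (num / 2^n) := by
        rw [← e]; ring
      rw [e2]; linarith
    calc (num / 2^b) % 2
        = ((r + 2^b * (2^(n-b-1) * 2 * (num / 2^n))) / 2^b) % 2 := by rw [← hnum]
      _ = (r / 2^b + 2^(n-b-1) * 2 * (num / 2^n)) % 2 := by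
            rw [Int.add_mul_ediv_left _ _ (by positivity : (2:Int)^b ≠ 0)]
      _ = (r / 2^b + 2 * (2^(n-b-1) * (num / 2^n))) % 2 := by ring_nf
      _ = (r / 2^b) % 2 := by
            rw [Int.add_mul_emod_self_left]
  have hcast : ((r.toNat / 2^b % 2 : Nat) : Int) = (num / 2^b) % 2 := by
    rw [key, Int.natCast_mod, Int.natCast_div, Int.toNat_of_nonneg hr0]
    push_cast
    ring
  unfold pyTestBit
  rw [PySem.Int.mod_eq_emod_of_pos (by norm_num : (0:Int) < 2),
      PySem.Int.floordiv_eq_ediv_of_pos h2b]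
  simp only [beq_iff_eq]
  by_cases hbit : r.toNat / 2 ^ b % 2 = 1
  · rw [if_pos (by rw [← hcast, hbit]; norm_num), if_pos hbit]
  · rw [if_neg (fun hc => hbit (by exact_mod_cast hcast.trans hc)), if_neg hbit]

lemma intercalate_cons_cons {α : Type} (sep g h : List α) (rest : List (List α)) :
    List.intercalate sep (g :: h :: rest) = g ++ sep ++ List.intercalate sep (h :: rest) := by
  simp [List.intercalate, List.intersperse]

lemma intercalate_singleton {α : Type} (sep g : List α) :
    List.intercalate sep [g] = g := by
  simp [List.intercalate, List.intersperse]

lemma intercalate_cons_head {α : Type} (sep : List α) (x : α) (g : List α) (rest : List (List α)) :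
    List.intercalate sep ((x :: g) :: rest) = x :: List.intercalate sep (g :: rest) := by
  cases rest with
  | nil => rw [intercalate_singleton, intercalate_singleton]
  | cons h t => rw [intercalate_cons_cons, intercalate_cons_cons]; simp

-- main structural lemma: the interleaved loop output equals the grouped join,
-- for any bit-character function c
lemma core_eq_groups (c : Nat → Char) (sep : List Char) :
    ∀ n : Nat, 0 < n →
      coreG c sep n
        = List.intercalate sep
            ((((List.range n).map c).reverse).take (if n % 8 = 0 then 8 else n % 8)
              :: chunk8 ((((List.range n).map c).reverse).drop (if n % 8 = 0 then 8 else n % 8))) := by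
  intro n
  induction n with
  | zero => intro h; omega
  | succ m ih =>
      intro _
      by_cases hm : m = 0
      · subst hm
        simp [coreG, List.range_succ, chunk8, intercalate_singleton]
      · have hM : ((List.range (m+1)).map c).reverse = c m :: ((List.range m).map c).reverse := by
          simp [List.range_succ]
        have hlen : (((List.range m).map c).reverse).length = m := by simp
        by_cases h8 : m % 8 = 0
        · -- new head group of size 1; previous head group was a full 8
          have hm8 : 8 ≤ m := by omega
          have hMne : ((List.range m).map c).reverse ≠ [] := by
            intro h; rw [h] at hlen; simp at hlen; omega
          obtain ⟨x, xs, hx⟩ := List.exists_cons_of_ne_nil hMne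
          have hch : chunk8 (((List.range m).map c).reverse)
              = (((List.range m).map c).reverse).take 8
                :: chunk8 ((((List.range m).map c).reverse).drop 8) := by
            rw [hx, chunk8]
          have hIH := ih (by omega)
          rw [if_pos h8] at hIH
          simp only [coreG, hM]
          rw [if_pos ⟨hm, h8⟩]
          rw [if_neg (show ¬ (m+1) % 8 = 0 by omega),
              show (m+1) % 8 = 1 by omega]
          rw [List.take_succ_cons, List.take_zero, List.drop_succ_cons, List.drop_zero, hch,
              intercalate_cons_cons, ← hIH]
          simp
        · -- head group grows by one
          have hdm1 : (if (m+1) % 8 = 0 then (8:Nat) else (m+1) % 8) = (m % 8) + 1 := by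
            split_ifs with h <;> omega
          have hIH := ih (by omega)
          rw [if_neg h8] at hIH
          simp only [coreG, hM, hdm1]
          rw [if_neg (show ¬ (m ≠ 0 ∧ m % 8 = 0) by tauto)]
          rw [List.take_succ_cons, List.drop_succ_cons, hIH, intercalate_cons_head]
          simp

-- ===== VERDICT (by name: the statement is the Claim_ definition above) =====
theorem to_bin_spec : Claim_equal_to_bin := by
  intro num sep bits _
  unfold Spec_to_bin to_bin to_bin_alt
  by_cases hb : bits ≤ 0
  · have h0 : bits.toNat = 0 := by omega
    rw [if_pos hb, h0]
    rfl
  · rw [if_neg hb]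
    have hn : 0 < bits.toNat := by omega
    rw [to_bin_loop_eq, List.nil_append]
    simp only []
    rw [fmtBin_reverse]
    have hmap : (List.range bits.toNat).map
          (fun b => if (PySem.Int.mod num ((2:Int)^bits.toNat)).toNat / 2^b % 2 = 1 then '1' else '0')
        = (List.range bits.toNat).map (fun b => if pyTestBit num b then '1' else '0') := by
      apply List.map_congr_left
      intro b hbmem
      exact (bit_agree num bits.toNat b (List.mem_range.mp hbmem)).symm
    rw [hmap, core_eq_groups _ _ _ hn]
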